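-- pv_equiv track=rewrite | github.com/sozelfist/Python-Fundamentals | algorithms/dynamic_programming/knuth_optimization.py | knuth_optimization
-- ===== SOURCE A (Python) =====
-- def knuth_optimization(nums: list[int]) -> int:
--     if not nums:
--         return 0
--
--     n = len(nums)
--     if n == 1:
--         return nums[0]
--
--     dp = [[0] * n for _ in range(n)]
--
--     for _ in range(n):
--         for i in range(n - _):
--             j = i + _
--             if _ == 0:
--                 dp[i][j] = nums[i]
--             elif _ == 1:
--                 dp[i][j] = max(nums[i], nums[j])
--             else:
--                 dp[i][j] = max(
--                     nums[i] + min(dp[i + 2][j], dp[i + 1][j - 1]),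
--                     nums[j] + min(dp[i + 1][j - 1], dp[i][j - 2]),
--                 )
--
--     return dp[0][n - 1]
-- ===== SOURCE B (Python) =====
-- def knuth_optimization(nums: list[int]) -> int:
--     # Top-down: recursive solve(i, j) over the interval [i, j], memoized with a dict,
--     # instead of filling a bottom-up table by increasing interval length.
--     if not nums:
--         return 0
--     n = len(nums)
--     if n == 1:
--         return nums[0]
--
--     memo = {}
--
--     def solve(i, j):
--         if (i, j) in memo:
--             return memo[(i, j)]
--         if i >= j:
--             v = nums[i]
--         elif j - i == 1:
--             v = max(nums[i], nums[j])
--         else: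
--             a = solve(i + 1, j - 1)
--             v = max(nums[i] + min(solve(i + 2, j), a),
--                     nums[j] + min(a, solve(i, j - 2)))
--         memo[(i, j)] = v
--         return v
--
--     return solve(0, n - 1)
-- ===== Notes on version B (the rewrite author's own statement) =====
-- stated objective: alternative
-- what changed: B replaces A's bottom-up table fill over increasing interval lengths with a top-down recursive solve(i, j) on shrinking subintervals, memoized with a dict; no 2D table is ever built.
import Mathlib
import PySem

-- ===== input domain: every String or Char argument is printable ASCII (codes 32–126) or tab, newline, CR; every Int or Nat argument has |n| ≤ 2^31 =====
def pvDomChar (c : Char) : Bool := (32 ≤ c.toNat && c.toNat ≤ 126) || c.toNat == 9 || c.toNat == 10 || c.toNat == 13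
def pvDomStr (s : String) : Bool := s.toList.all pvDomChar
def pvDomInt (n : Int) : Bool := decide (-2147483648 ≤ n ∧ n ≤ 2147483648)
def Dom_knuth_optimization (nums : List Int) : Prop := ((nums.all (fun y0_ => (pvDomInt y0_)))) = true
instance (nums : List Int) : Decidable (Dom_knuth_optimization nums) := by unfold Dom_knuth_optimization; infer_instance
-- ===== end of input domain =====

-- B replaces A's bottom-up length-increasing table fill with a top-down recursive solve(i, j)
-- over shrinking subintervals (memoized in Python; the memo only caches values, so the Lean
-- port is the same recursion without the cache); return values agree everywhere.

-- ===== PORT A =====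
-- dp[i][j] read / dp[i][j] = v write (indices are always nonnegative and in range in A)
def pvGet2 (dp : List (List Int)) (i j : Int) : Int :=
  PySem.List.pyGetD (PySem.List.pyGetD dp i []) j 0

def pvSet2 (dp : List (List Int)) (i j : Int) (v : Int) : List (List Int) :=
  dp.set i.toNat ((PySem.List.pyGetD dp i []).set j.toNat v)

-- the body of A's inner `for i in range(n - _)` loop (named helper, transliterated verbatim)
def aInner (nums : List Int) (L : Int) (dp : List (List Int)) (i : Int) : List (List Int) :=
  let j := i + L
  if L = 0 then pvSet2 dp i j (PySem.List.pyGetD nums i 0)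
  else if L = 1 then
    pvSet2 dp i j (max (PySem.List.pyGetD nums i 0) (PySem.List.pyGetD nums j 0))
  else
    pvSet2 dp i j (max
      (PySem.List.pyGetD nums i 0 + min (pvGet2 dp (i + 2) j) (pvGet2 dp (i + 1) (j - 1)))
      (PySem.List.pyGetD nums j 0 + min (pvGet2 dp (i + 1) (j - 1)) (pvGet2 dp i (j - 2))))

def knuth_optimization (nums : List Int) : Int :=
  if nums = [] then 0
  else
    let n : Int := (nums.length : Int)
    if n = 1 then PySem.List.pyGetD nums 0 0
    else
      let dp0 : List (List Int) :=
        (PySem.List.pyRange 0 n 1).map (fun _ => List.replicate nums.length (0 : Int))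
      let dp := (PySem.List.pyRange 0 n 1).foldl (fun dp L =>
        (PySem.List.pyRange 0 (n - L) 1).foldl (aInner nums L) dp) dp0
      pvGet2 dp 0 (n - 1)

-- ===== PORT B =====
-- Source B's solve(i, j): recursion on the shrinking interval [i, j]
-- (the Python memo dict only caches return values and is dropped here)
def bsolve (nums : List Int) (i j : Nat) : Int :=
  if i ≥ j then nums.getD i 0
  else if j - i = 1 then max (nums.getD i 0) (nums.getD j 0)
  else
    let a := bsolve nums (i + 1) (j - 1)
    max (nums.getD i 0 + min (bsolve nums (i + 2) j) a)
        (nums.getD j 0 + min a (bsolve nums i (j - 2)))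
  termination_by j - i
  decreasing_by all_goals omega

def knuth_optimization_alt (nums : List Int) : Int :=
  if nums = [] then 0
  else
    let n := nums.length
    if n = 1 then nums.getD 0 0
    else bsolve nums 0 (n - 1)

-- ===== PRECONDITION & SPEC =====
def Spec_knuth_optimization (nums : List Int) (out : Int) : Prop := out = knuth_optimization_alt nums
instance (nums : List Int) (out : Int) : Decidable (Spec_knuth_optimization nums out) := by unfold Spec_knuth_optimization; infer_instance

-- ===== CLAIM (what is proved, stated in full; the proofs are below) =====
def Claim_equal_knuth_optimization : Prop := ∀ (nums : List Int), Dom_knuth_optimization nums → Spec_knuth_optimization nums (knuth_optimization nums)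

-- ===== LEMMAS AND PROOFS =====

-- the common recurrence: optimal value of the interval of length d starting at i
def gval (nums : List Int) (i : Nat) : Nat → Int
  | 0 => nums.getD i 0
  | 1 => max (nums.getD i 0) (nums.getD (i + 1) 0)
  | (L + 2) =>
      max (nums.getD i 0 + min (gval nums (i + 2) L) (gval nums (i + 1) L))
          (nums.getD (i + L + 2) 0 + min (gval nums (i + 1) L) (gval nums i L))

-- Nat-indexed forms of A's table operations and loop body
def nGet (dp : List (List Int)) (a b : Nat) : Int := (dp.getD a []).getD b 0
def nSet (dp : List (List Int)) (a b : Nat) (v : Int) : List (List Int) :=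
  dp.set a ((dp.getD a []).set b v)

def abody (nums : List Int) (L : Nat) (dp : List (List Int)) (i : Nat) : List (List Int) :=
  if L = 0 then nSet dp i (i + L) (nums.getD i 0)
  else if L = 1 then nSet dp i (i + L) (max (nums.getD i 0) (nums.getD (i + L) 0))
  else nSet dp i (i + L) (max
    (nums.getD i 0 + min (nGet dp (i + 2) (i + L)) (nGet dp (i + 1) (i + L - 1)))
    (nums.getD (i + L) 0 + min (nGet dp (i + 1) (i + L - 1)) (nGet dp i (i + L - 2))))

def Shape (n : Nat) (dp : List (List Int)) : Prop :=
  dp.length = n ∧ ∀ r, r < n → (dp.getD r []).length = n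

def Corr (nums : List Int) (dp : List (List Int)) (Ld : Nat) : Prop :=
  ∀ i d, d < Ld → i + d < nums.length → nGet dp i (i + d) = gval nums i d

lemma pvGet2_natCast (dp : List (List Int)) (a b : Nat) :
    pvGet2 dp (a : Int) (b : Int) = nGet dp a b := by
  unfold pvGet2 nGet
  rw [PySem.List.pyGetD_natCast, PySem.List.pyGetD_natCast]

lemma pvSet2_natCast (dp : List (List Int)) (a b : Nat) (v : Int) :
    pvSet2 dp (a : Int) (b : Int) v = nSet dp a b v := by
  unfold pvSet2 nSet
  rw [PySem.List.pyGetD_natCast, Int.toNat_natCast, Int.toNat_natCast]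

lemma aInner_natCast (nums : List Int) (dp : List (List Int)) (L i : Nat) :
    aInner nums (L : Int) dp (i : Int) = abody nums L dp i := by
  have hj : (i : Int) + (L : Int) = ((i + L : Nat) : Int) := by push_cast; ring
  unfold aInner abody
  by_cases h0 : L = 0
  · subst h0
    rw [if_pos (by norm_num), if_pos rfl, hj, pvSet2_natCast, PySem.List.pyGetD_natCast]
  · by_cases h1 : L = 1
    · subst h1
      rw [if_neg (by norm_num), if_pos (by norm_num), if_neg h0, if_pos rfl, hj,
          pvSet2_natCast, PySem.List.pyGetD_natCast, PySem.List.pyGetD_natCast]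
    · rw [if_neg (by exact_mod_cast h0), if_neg (by exact_mod_cast h1), if_neg h0, if_neg h1, hj]
      have e1 : ((i + L : Nat) : Int) - 1 = ((i + L - 1 : Nat) : Int) := by
        have h : 1 ≤ i + L := by omega
        push_cast [Nat.cast_sub h]; ring
      have e2 : ((i + L : Nat) : Int) - 2 = ((i + L - 2 : Nat) : Int) := by
        have h : 2 ≤ i + L := by omega
        push_cast [Nat.cast_sub h]; ring
      have e3 : (i : Int) + 2 = ((i + 2 : Nat) : Int) := by push_cast; ring
      have e4 : (i : Int) + 1 = ((i + 1 : Nat) : Int) := by push_cast; ring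
      rw [e1, e2, e3, e4, pvSet2_natCast, pvGet2_natCast, pvGet2_natCast, pvGet2_natCast,
          PySem.List.pyGetD_natCast, PySem.List.pyGetD_natCast]

lemma pyRange_zero_nat' (n : Nat) :
    PySem.List.pyRange 0 (n : Int) 1 = (List.range n).map (fun (k : Nat) => (k : Int)) := by
  apply List.ext_getElem
  · simp [PySem.List.length_pyRange_one]
  · intro k h1 h2
    rw [PySem.List.getElem_pyRange_one]
    simp only [List.getElem_map, List.getElem_range, zero_add]

lemma A_as_nat (nums : List Int) (h0 : nums ≠ []) (h1 : nums.length ≠ 1) :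
    knuth_optimization nums =
      nGet ((List.range nums.length).foldl
        (fun dp L => (List.range (nums.length - L)).foldl (abody nums L) dp)
        ((List.range nums.length).map (fun _ => List.replicate nums.length (0 : Int))))
        0 (nums.length - 1) := by
  have h1' : ¬ ((nums.length : Int) = 1) := by exact_mod_cast h1
  have hn1 : 1 ≤ nums.length := by
    have : nums.length ≠ 0 := by simpa using h0
    omega
  unfold knuth_optimization
  rw [if_neg h0, if_neg h1']
  simp only [pyRange_zero_nat', List.foldl_map, List.map_map, Function.comp_def]
  have hlast : ((nums.length : Int) - 1) = ((nums.length - 1 : Nat) : Int) := by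
    push_cast [Nat.cast_sub hn1]; ring
  have hget : ∀ (dp : List (List Int)) (b : Nat), pvGet2 dp 0 ((b : Nat) : Int) = nGet dp 0 b := by
    intro dp b
    rw [show (0 : Int) = ((0 : Nat) : Int) from rfl, pvGet2_natCast]
  rw [hlast, hget]
  congr 1
  apply PySem.List.foldl_congr_mem
  intro acc L hL
  have hLlen : L < nums.length := List.mem_range.mp hL
  have hc : ((nums.length : Int) - (L : Int)) = ((nums.length - L : Nat) : Int) := by
    push_cast [Nat.cast_sub hLlen.le]; ring
  rw [hc, pyRange_zero_nat', List.foldl_map]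
  have hf : (fun (dp : List (List Int)) (k : Nat) => aInner nums (L : Int) dp (k : Int))
      = abody nums L := by
    funext dp k
    exact aInner_natCast nums dp L k
  rw [hf]

lemma getD_set_list (dp : List (List Int)) (a x : Nat) (row : List Int) :
    (dp.set a row).getD x [] = if x = a ∧ a < dp.length then row else dp.getD x [] := by
  rw [List.getD_eq_getElem?_getD, List.getElem?_set, List.getD_eq_getElem?_getD]
  by_cases h1 : a = x
  · subst h1
    by_cases h2 : a < dp.length
    · simp [h2]
    · simp [h2]
  · rw [if_neg h1, if_neg (by tauto)]

lemma nGet_nSet (dp : List (List Int)) (a b x y : Nat) (v : Int) (ha : a < dp.length)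
    (hb : b < (dp.getD a []).length) :
    nGet (nSet dp a b v) x y = if x = a ∧ y = b then v else nGet dp x y := by
  unfold nGet nSet
  rw [getD_set_list]
  by_cases hx : x = a
  · subst hx
    rw [if_pos ⟨rfl, ha⟩]
    rw [List.getD_eq_getElem?_getD, List.getElem?_set, List.getD_eq_getElem?_getD]
    by_cases h1 : b = y
    · subst h1
      rw [List.getD_eq_getElem?_getD] at hb
      simp [hb]
    · rw [if_neg h1, if_neg (by tauto)]
      simp [List.getD_eq_getElem?_getD]
  · rw [if_neg (by tauto), if_neg (by tauto)]

lemma shape_nSet {n : Nat} {dp : List (List Int)} (h : Shape n dp) (a b : Nat) (v : Int) :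
    Shape n (nSet dp a b v) := by
  obtain ⟨hl, hr⟩ := h
  refine ⟨by simp [nSet, hl], ?_⟩
  intro r hrn
  unfold nSet
  rw [getD_set_list]
  split_ifs with hc
  · obtain ⟨rfl, _⟩ := hc
    rw [List.length_set]
    exact hr r hrn
  · exact hr r hrn

lemma inner_fold (nums : List Int) (L k : Nat) (dp : List (List Int))
    (hk : k ≤ nums.length - L) (hL : L < nums.length)
    (hsh : Shape nums.length dp) (hc : Corr nums dp L) :
    Shape nums.length ((List.range k).foldl (abody nums L) dp) ∧
    Corr nums ((List.range k).foldl (abody nums L) dp) L ∧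
    (∀ i, i < k → nGet ((List.range k).foldl (abody nums L) dp) i (i + L) = gval nums i L) := by
  induction k with
  | zero => exact ⟨hsh, hc, fun i h => absurd h (Nat.not_lt_zero i)⟩
  | succ k ih =>
      obtain ⟨sh', c', d'⟩ := ih (by omega)
      rw [List.range_succ, List.foldl_append, List.foldl_cons, List.foldl_nil] at *
      set dp' := (List.range k).foldl (abody nums L) dp with hdp'
      have hkn : k < nums.length := by omega
      have hkL : k + L < nums.length := by omega
      have hlen : k < dp'.length := by rw [sh'.1]; exact hkn
      have hrow : k + L < (dp'.getD k []).length := by rw [sh'.2 k hkn]; exact hkL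
      have hval : abody nums L dp' k = nSet dp' k (k + L) (gval nums k L) := by
        unfold abody
        by_cases h0 : L = 0
        · subst h0
          rw [if_pos rfl]
          rfl
        · by_cases h1 : L = 1
          · subst h1
            rw [if_neg h0, if_pos rfl]
            rfl
          · obtain ⟨m, rfl⟩ : ∃ m, L = m + 2 := ⟨L - 2, by omega⟩
            rw [if_neg h0, if_neg h1]
            have r1 : k + (m + 2) - 1 = (k + 1) + m := by omega
            have r2 : k + (m + 2) - 2 = k + m := by omega
            have r3 : k + (m + 2) = (k + 2) + m := by omega
            have hg1 : nGet dp' (k + 2) (k + (m + 2)) = gval nums (k + 2) m := by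
              rw [r3]; exact c' (k + 2) m (by omega) (by omega)
            have hg2 : nGet dp' (k + 1) (k + (m + 2) - 1) = gval nums (k + 1) m := by
              rw [r1]; exact c' (k + 1) m (by omega) (by omega)
            have hg3 : nGet dp' k (k + (m + 2) - 2) = gval nums k m := by
              rw [r2]; exact c' k m (by omega) (by omega)
            rw [hg1, hg2, hg3]
            rfl
      rw [hval]
      refine ⟨shape_nSet sh' _ _ _, ?_, ?_⟩
      · intro i d hd hin
        rw [nGet_nSet dp' k (k + L) i (i + d) _ hlen hrow,
            if_neg (by rintro ⟨rfl, h⟩; omega)]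
        exact c' i d hd hin
      · intro i hik
        rw [nGet_nSet dp' k (k + L) i (i + L) _ hlen hrow]
        by_cases hik' : i = k
        · subst hik'
          rw [if_pos ⟨rfl, rfl⟩]
        · rw [if_neg (by tauto)]
          exact d' i (by omega)

lemma outer_fold (nums : List Int) (m : Nat) (hm : m ≤ nums.length) (dp : List (List Int))
    (hsh : Shape nums.length dp) :
    Shape nums.length ((List.range m).foldl
        (fun dp L => (List.range (nums.length - L)).foldl (abody nums L) dp) dp) ∧
    Corr nums ((List.range m).foldl
        (fun dp L => (List.range (nums.length - L)).foldl (abody nums L) dp) dp) m := by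
  induction m with
  | zero => exact ⟨hsh, fun i d hd _ => absurd hd (Nat.not_lt_zero d)⟩
  | succ m ih =>
      obtain ⟨sh', c'⟩ := ih (by omega)
      rw [List.range_succ, List.foldl_append, List.foldl_cons, List.foldl_nil] at *
      have h := inner_fold nums m (nums.length - m) _ le_rfl (by omega) sh' c'
      refine ⟨h.1, ?_⟩
      intro i d hd hin
      by_cases hdm : d = m
      · subst hdm
        exact h.2.2 i (by omega)
      · exact h.2.1 i d (by omega) hin

lemma A_eq_gval (nums : List Int) (h0 : nums ≠ []) (h1 : nums.length ≠ 1) :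
    knuth_optimization nums = gval nums 0 (nums.length - 1) := by
  have hn1 : 1 ≤ nums.length := by
    have : nums.length ≠ 0 := by simpa using h0
    omega
  rw [A_as_nat nums h0 h1]
  have hshape0 : Shape nums.length
      ((List.range nums.length).map (fun _ => List.replicate nums.length (0 : Int))) := by
    refine ⟨by simp, ?_⟩
    intro r hr
    rw [List.getD_eq_getElem?_getD, List.getElem?_map, List.getElem?_range hr]
    simp
  have h := (outer_fold nums nums.length le_rfl _ hshape0).2
  have := h 0 (nums.length - 1) (by omega) (by omega)
  simpa using this

-- B-side: the recursive solver computes the same recurrence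
lemma bsolve_eq_gval (nums : List Int) (d : Nat) : ∀ i, bsolve nums i (i + d) = gval nums i d := by
  induction d using Nat.strong_induction_on with
  | _ d ih =>
    intro i
    match d with
    | 0 => rw [bsolve, if_pos (by omega)]; rfl
    | 1 =>
        rw [bsolve, if_neg (by omega), if_pos (by omega)]
        rfl
    | (L + 2) =>
        rw [bsolve, if_neg (by omega), if_neg (by omega)]
        have ha : i + (L + 2) - 1 = (i + 1) + L := by omega
        have hc : i + (L + 2) - 2 = i + L := by omega
        have hb : i + (L + 2) = (i + 2) + L := by omega
        rw [ha, hc, hb, ih L (by omega), ih L (by omega), ih L (by omega)]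
        have hd : (i + 2) + L = i + L + 2 := by omega
        rw [hd]
        rfl

lemma B_eq_gval (nums : List Int) (h0 : nums ≠ []) (h1 : nums.length ≠ 1) :
    knuth_optimization_alt nums = gval nums 0 (nums.length - 1) := by
  unfold knuth_optimization_alt
  rw [if_neg h0, if_neg h1]
  have := bsolve_eq_gval nums (nums.length - 1) 0
  simpa using this

-- ===== VERDICT (by name: the statement is the Claim_ definition above) =====
theorem knuth_optimization_spec : Claim_equal_knuth_optimization := by
  intro nums _
  unfold Spec_knuth_optimization
  by_cases h0 : nums = []
  · subst h0; rfl
  · by_cases h1 : nums.length = 1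
    · obtain ⟨x, t, rfl⟩ := List.exists_cons_of_ne_nil h0
      simp at h1
      simp [h1, knuth_optimization, knuth_optimization_alt, PySem.List.pyGetD_zero]
    · rw [A_eq_gval nums h0 h1, B_eq_gval nums h0 h1]
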